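-- pv_equiv track=rewrite | github.com/Dax246/FIT3155 | Assignment 3/header.py | elias
-- ===== SOURCE A (Python) =====
-- def elias(n):
--     """
--     Finds the elias code for integer n
--     :param n: integer that needs to be encoded
--     :return: binary string containing the elias code for n
--     """
--     x = bin(n)
--
--     # Binary of the integer without 0b at the front
--     code_component = x[2:len(x)]
--
--     last_encoding = code_component
--     encodings = [code_component]
--     while len(last_encoding) != 1:
--         x = bin(len(last_encoding) - 1)
--         last_encoding = x[2:len(x)]
--
--         # Converts first char to 0 for length components
--         last_encoding = "0" + last_encoding[1:len(last_encoding)]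
--         encodings.append(last_encoding)
--
--     # code components and list components in the wrong order in encodings. Final string needs to be reversed
--     encodings.reverse()
--     encodings = "".join(encodings)
--     return encodings
-- ===== SOURCE B (Python) =====
-- def _prefix(L):
--     """Concatenated chain of length components preceding a block of length L."""
--     if L == 1:
--         return ""
--     m = L - 1
--     lc = "0" + format(m, "b")[1:]
--     return _prefix(m.bit_length()) + lc
--
--
-- def elias(n):
--     code = bin(n)[2:]
--     return _prefix(len(code)) + code
-- ===== Notes on version B (the rewrite author's own statement) =====
-- stated objective: alternative
-- what changed: Replaces A's string-driven while-loop (accumulating components in a list, then reverse+join) with a recursion over the integer chain of lengths: a helper on the block length L builds each length component arithmetically from L-1 (format/bit_length) and prepends its own prefix, so no list of strings, no reverse and no join exist.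
import Mathlib
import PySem

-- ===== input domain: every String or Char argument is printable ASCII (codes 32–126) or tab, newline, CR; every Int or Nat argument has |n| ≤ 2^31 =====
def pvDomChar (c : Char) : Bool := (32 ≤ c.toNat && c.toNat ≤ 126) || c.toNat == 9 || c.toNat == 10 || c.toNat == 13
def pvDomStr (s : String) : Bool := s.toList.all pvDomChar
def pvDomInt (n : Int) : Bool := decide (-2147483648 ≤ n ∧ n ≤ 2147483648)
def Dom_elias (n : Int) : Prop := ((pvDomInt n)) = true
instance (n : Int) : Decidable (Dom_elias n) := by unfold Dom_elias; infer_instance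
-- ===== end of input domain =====

-- B replaces A's string-driven loop + list + reverse + join with a recursion over the
-- integer chain of block lengths, building each length component arithmetically.

-- Shared primitive: bits k = binary digits of k (MSB first, [] for 0), i.e. format(k,'b') for k > 0;
-- pyBin n = bin(n).toList, exactly Python's bin (sign, then "0b", then digits, bin(0)="0b0").
def bits : Nat → List Char
  | 0 => []
  | (k+1) => bits ((k+1) / 2) ++ [if (k+1) % 2 = 1 then '1' else '0']

theorem bits_length_le : ∀ k : Nat, (bits k).length ≤ k := by
  intro k
  induction k using Nat.strong_induction_on with
  | _ k ih =>
    match k with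
    | 0 => simp [bits]
    | (m+1) =>
      have h := ih ((m+1)/2) (by omega)
      simp [bits]
      omega

theorem bits_ne_nil (k : Nat) (h : k ≠ 0) : bits k ≠ [] := by
  match k with
  | (m+1) => simp [bits]

def pyBin (n : Int) : List Char :=
  (if n < 0 then ['-'] else []) ++ ['0', 'b'] ++ (if n = 0 then ['0'] else bits n.natAbs)

-- length of the '0'-prefixed length component computed from a block of length len ≥ 2
theorem lc_length_lt (len : Nat) (h2 : 2 ≤ len) :
    ('0' :: ((pyBin ((len : Int) - 1)).drop 2).drop 1).length < len := by
  have hpos : ¬ ((len : Int) - 1 < 0) := by omega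
  have hne : ¬ ((len : Int) - 1 = 0) := by omega
  have habs : ((len : Int) - 1).natAbs = len - 1 := by omega
  have hnn : bits (len - 1) ≠ [] := bits_ne_nil _ (by omega)
  have hle := bits_length_le (len - 1)
  simp [pyBin, hpos, hne, habs]
  cases hb : bits (len - 1) with
  | nil => exact absurd hb hnn
  | cons c cs => rw [hb] at hle; simp at hle ⊢; omega

-- ===== PORT A =====
-- A's while-loop: appends each length component to `encodings`; guard on the (unreachable
-- from elias: code_component is never empty) length-0 case only to make the recursion total.
def eliasLoop (last : List Char) (encodings : List (List Char)) : List (List Char) :=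
  if last.length = 1 then encodings
  else if h0 : last.length < 2 then encodings
  else
    let x := pyBin ((last.length : Int) - 1)
    let le := x.drop 2
    let le' := '0' :: le.drop 1
    eliasLoop le' (encodings ++ [le'])
termination_by last.length
decreasing_by exact lc_length_lt _ (by omega)

def elias (n : Int) : String :=
  let x := pyBin n
  let code_component := x.drop 2
  let encodings := eliasLoop code_component [code_component]
  String.mk encodings.reverse.flatten

-- ===== PORT B =====
-- B's helper _prefix: recursion on the NUMBER L (a block length), not on a string; the
-- length component is '0' + format(L-1,'b')[1:] and the recursive call is on (L-1).bit_length()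
-- = (bits (L-1)).length. Guard L < 2 is unreachable from elias_alt (totality only).
def prefixChain (L : Nat) : List Char :=
  if L = 1 then []
  else if hL : L < 2 then []
  else
    let m := L - 1
    prefixChain (bits m).length ++ ('0' :: (bits m).drop 1)
termination_by L
decreasing_by have := bits_length_le (L - 1); omega

def elias_alt (n : Int) : String :=
  let code := (pyBin n).drop 2
  String.mk (prefixChain code.length ++ code)

-- ===== PRECONDITION & SPEC =====
def Spec_elias (n : Int) (out : String) : Prop := out = elias_alt n
instance (n : Int) (out : String) : Decidable (Spec_elias n out) := by unfold Spec_elias; infer_instance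

-- ===== CLAIM (what is proved, stated in full; the proofs are below) =====
def Claim_equal_elias : Prop := ∀ (n : Int), Dom_elias n → Spec_elias n (elias n)

-- ===== LEMMAS AND PROOFS =====

-- A's length component, built from the string pyBin (len-1), is B's arithmetic one
theorem lc_eq (len : Nat) (h2 : 2 ≤ len) :
    ('0' :: ((pyBin ((len : Int) - 1)).drop 2).drop 1) = '0' :: (bits (len - 1)).drop 1 := by
  have hpos : ¬ ((len : Int) - 1 < 0) := by omega
  have hne : ¬ ((len : Int) - 1 = 0) := by omega
  have habs : ((len : Int) - 1).natAbs = len - 1 := by omega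
  simp [pyBin, hpos, hne, habs]

theorem lc_length (len : Nat) (h2 : 2 ≤ len) :
    ('0' :: (bits (len - 1)).drop 1).length = (bits (len - 1)).length := by
  have hnn : bits (len - 1) ≠ [] := bits_ne_nil _ (by omega)
  cases hb : bits (len - 1) with
  | nil => exact absurd hb hnn
  | cons c cs => simp

theorem eliasLoop_eq (last : List Char) (encodings : List (List Char)) :
    (eliasLoop last encodings).reverse.flatten = prefixChain last.length ++ encodings.reverse.flatten := by
  fun_induction eliasLoop last encodings with
  | case1 last enc h1 => rw [prefixChain]; simp [h1]
  | case2 last enc h1 h0 => rw [prefixChain]; simp [h1, h0]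
  | case3 last enc h1 h0 x le le' ih =>
    rw [ih]
    conv_rhs => rw [prefixChain]
    simp only [h1, h0, if_false, reduceDIte, List.reverse_append, List.flatten_append]
    have h2 : 2 ≤ last.length := by omega
    have hlc : le' = '0' :: (bits (last.length - 1)).drop 1 := by
      simpa [le', le, x, List.drop_drop] using lc_eq last.length h2
    rw [hlc, lc_length last.length h2]
    simp

-- ===== VERDICT (by name: the statement is the Claim_ definition above) =====
theorem elias_spec : Claim_equal_elias := by
  intro n _
  show elias n = elias_alt n
  simp only [elias, elias_alt, eliasLoop_eq]
  simp
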